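-- pv_equiv track=rewrite | github.com/LautareteX/holbertonschool-web_back_end | NoSQL/12-log_stats.py | analyze_logs
-- ===== SOURCE A (Python) =====
-- def analyze_logs(logs):
--     """ analyze logs function """
--     methods = {
--         'GET': 0,
--         'POST': 0,
--         'PUT': 0,
--         'PATCH': 0,
--         'DELETE': 0
--     }
--
--     status_check = 0
--
--     for my_doc in logs:
--         method = my_doc.get('method', '')
--         if method in methods:
--             methods[method] += 1
--
--         path = my_doc.get('path', '')
--         if path == '/status':
--             status_check += 1
--     return methods, status_check
-- ===== SOURCE B (Python) =====
-- _KEYS = ('GET', 'POST', 'PUT', 'PATCH', 'DELETE')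
--
--
-- def _doc_stats(doc):
--     """ stats of a single document """
--     m = doc.get('method', '')
--     counts = {k: (1 if m == k else 0) for k in _KEYS}
--     status = 1 if doc.get('path', '') == '/status' else 0
--     return counts, status
--
--
-- def _merge(left, right):
--     """ pointwise combination of two partial results """
--     counts = {k: left[0][k] + right[0][k] for k in _KEYS}
--     return counts, left[1] + right[1]
--
--
-- def _conquer(logs):
--     """ divide and conquer over the log list """
--     n = len(logs)
--     if n == 0:
--         return {k: 0 for k in _KEYS}, 0
--     if n == 1:
--         return _doc_stats(logs[0])
--     mid = n // 2
--     return _merge(_conquer(logs[:mid]), _conquer(logs[mid:]))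
--
--
-- def analyze_logs(logs):
--     """ analyze logs function """
--     return _conquer(logs)
-- ===== Notes on version B (the rewrite author's own statement) =====
-- stated objective: alternative
-- what changed: Replaces A's single sequential loop that conditionally increments a mutable dict by a divide-and-conquer recursion: split the list in halves, compute (method counts, status count) for each half recursively, and merge the two partial results pointwise over the fixed five keys; correctness rests on the merge being the pointwise sum, which distributes over list concatenation.
import Mathlib
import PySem

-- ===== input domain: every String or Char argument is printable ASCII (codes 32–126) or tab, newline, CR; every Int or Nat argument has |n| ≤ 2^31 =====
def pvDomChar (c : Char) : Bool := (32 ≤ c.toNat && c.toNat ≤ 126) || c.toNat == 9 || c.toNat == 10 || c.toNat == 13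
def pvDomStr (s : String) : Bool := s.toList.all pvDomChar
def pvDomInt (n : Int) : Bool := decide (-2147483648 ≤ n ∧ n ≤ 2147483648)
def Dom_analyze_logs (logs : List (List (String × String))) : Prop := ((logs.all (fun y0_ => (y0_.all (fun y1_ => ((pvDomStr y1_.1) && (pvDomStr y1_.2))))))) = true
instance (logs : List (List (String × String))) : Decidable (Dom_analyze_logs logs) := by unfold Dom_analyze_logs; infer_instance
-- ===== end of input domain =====

-- B replaces A's single guarded-increment loop by a divide-and-conquer recursion
-- (split in halves, recurse, merge partial results pointwise over the five fixed keys): an alternative algorithm.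


-- ===== PORT A =====
-- one loop step of A's for-loop: guarded increment of the methods dict + status counter
def pvStepA (st : PySem.Dict String Int × Int) (my_doc : List (String × String)) :
    PySem.Dict String Int × Int :=
  let method := (PySem.Dict.mk my_doc).getD "method" ""
  let methods := if st.1.contains method then st.1.modify method 0 (· + 1) else st.1
  let path := (PySem.Dict.mk my_doc).getD "path" ""
  (methods, if path == "/status" then st.2 + 1 else st.2)

def analyze_logs (logs : List (List (String × String))) : (List (String × Int)) × Int :=
  let methods0 : PySem.Dict String Int :=
    PySem.Dict.mk [("GET", 0), ("POST", 0), ("PUT", 0), ("PATCH", 0), ("DELETE", 0)]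
  let st := logs.foldl pvStepA (methods0, 0)
  (st.1.items, st.2)

-- ===== PORT B =====
def pvKeys : List String := ["GET", "POST", "PUT", "PATCH", "DELETE"]

def pvDocStats (doc : List (String × String)) : (List (String × Int)) × Int :=
  let m := (PySem.Dict.mk doc).getD "method" ""
  (pvKeys.map (fun k => (k, if m == k then (1 : Int) else 0)),
   if (PySem.Dict.mk doc).getD "path" "" == "/status" then (1 : Int) else 0)

-- left[0][k]: a plain dict lookup; every key of _KEYS is present, so getD is exact here
def pvMergeB (l r : (List (String × Int)) × Int) : (List (String × Int)) × Int :=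
  (pvKeys.map (fun k => (k, (PySem.Dict.mk l.1).getD k 0 + (PySem.Dict.mk r.1).getD k 0)),
   l.2 + r.2)

def pvConquer (logs : List (List (String × String))) : (List (String × Int)) × Int :=
  match logs with
  | [] => (pvKeys.map (fun k => (k, (0 : Int))), 0)
  | [d] => pvDocStats d
  | a :: b :: rest =>
      let mid := (a :: b :: rest).length / 2  -- n // 2 on a nonneg length: Nat division is exact here
      pvMergeB (pvConquer ((a :: b :: rest).take mid)) (pvConquer ((a :: b :: rest).drop mid))
termination_by logs.length
decreasing_by
  · simp [List.length_take]; omega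
  · simp; omega

def analyze_logs_alt (logs : List (List (String × String))) : (List (String × Int)) × Int :=
  pvConquer logs

-- ===== PRECONDITION & SPEC =====
def Spec_analyze_logs (logs : List (List (String × String))) (out : (List (String × Int)) × Int) : Prop := out = analyze_logs_alt logs
instance (logs : List (List (String × String))) (out : (List (String × Int)) × Int) : Decidable (Spec_analyze_logs logs out) := by unfold Spec_analyze_logs; infer_instance

-- ===== CLAIM (what is proved, stated in full; the proofs are below) =====
def Claim_equal_analyze_logs : Prop := ∀ (logs : List (List (String × String))), Dom_analyze_logs logs → Spec_analyze_logs logs (analyze_logs logs)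

-- ===== LEMMAS AND PROOFS =====

-- the common closed form both programs compute
def pvMCount (k : String) (logs : List (List (String × String))) : Int :=
  ((logs.map (fun d => (PySem.Dict.mk d).getD "method" "")).count k : Int)
def pvSCount (logs : List (List (String × String))) : Int :=
  (logs.countP (fun d => (PySem.Dict.mk d).getD "path" "" == "/status") : Int)

theorem pvMCount_append (k : String) (xs ys : List (List (String × String))) :
    pvMCount k (xs ++ ys) = pvMCount k xs + pvMCount k ys := by
  simp [pvMCount, List.count_append]

theorem pvSCount_append (xs ys : List (List (String × String))) :
    pvSCount (xs ++ ys) = pvSCount xs + pvSCount ys := by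
  simp [pvSCount, List.countP_append]

-- B computes the closed form (by the recursion of pvConquer)
theorem pvConquer_eq (logs : List (List (String × String))) :
    pvConquer logs = (pvKeys.map (fun k => (k, pvMCount k logs)), pvSCount logs) := by
  fun_induction pvConquer logs with
  | case1 => simp [pvMCount, pvSCount]
  | case2 d =>
      simp [pvDocStats, pvMCount, pvSCount, pvKeys, List.count_cons, List.countP_cons]
  | case3 a b rest mid ih1 ih2 =>
      rw [ih1, ih2]
      have hsplit := List.take_append_drop mid (a :: b :: rest)
      conv_rhs => rw [← hsplit]
      simp only [pvMergeB, pvMCount_append, pvSCount_append]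
      simp [pvKeys, PySem.Dict.getD_eq_get?_getD, PySem.Dict.get?_mk_cons]

-- the keys of the methods dict never change through A's loop
theorem pvLoop_keys (logs : List (List (String × String))) (d : PySem.Dict String Int) (s : Int) :
    (logs.foldl pvStepA (d, s)).1.keys = d.keys := by
  induction logs generalizing d s with
  | nil => rfl
  | cons doc rest ih =>
    simp only [List.foldl_cons]
    rw [show pvStepA (d, s) doc = ((pvStepA (d, s) doc).1, (pvStepA (d, s) doc).2) from rfl]
    rw [ih]
    simp only [pvStepA]
    split
    · rename_i h
      rw [PySem.Dict.keys_modify, PySem.Dict.keys_insert_of_contains _ _ h]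
    · rfl

-- the counter value of each present key after A's loop
theorem pvLoop_getD (logs : List (List (String × String))) (d : PySem.Dict String Int) (s : Int)
    (k : String) (hk : k ∈ d.keys) :
    (logs.foldl pvStepA (d, s)).1.getD k 0 = d.getD k 0 + pvMCount k logs := by
  induction logs generalizing d s with
  | nil => simp [pvMCount]
  | cons doc rest ih =>
    simp only [List.foldl_cons]
    have hst : pvStepA (d, s) doc = ((pvStepA (d, s) doc).1, (pvStepA (d, s) doc).2) := rfl
    rw [hst]
    have hkeys : (pvStepA (d, s) doc).1.keys = d.keys := by
      simpa using pvLoop_keys [doc] d s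
    have hk' : k ∈ (pvStepA (d, s) doc).1.keys := hkeys ▸ hk
    rw [ih _ _ hk']
    simp only [pvStepA, pvMCount, List.map_cons]
    set m := (PySem.Dict.mk doc).getD "method" "" with hm
    by_cases hcm : d.contains m = true
    · simp only [hcm, if_true]
      rw [PySem.Dict.getD_modify]
      by_cases hkm : k = m
      · subst hkm
        simp
        ring
      · simp [hkm, Ne.symm hkm]
    · simp only [hcm]
      have hkm : k ≠ m := by
        intro h; subst h
        rw [PySem.Dict.contains_eq_decide_mem_keys] at hcm
        simp [hk] at hcm
      simp [Ne.symm hkm]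

-- the status counter accumulates independently of the dict
theorem pvLoop_snd (logs : List (List (String × String))) (d : PySem.Dict String Int) (s : Int) :
    (logs.foldl pvStepA (d, s)).2 = s + pvSCount logs := by
  induction logs generalizing d s with
  | nil => simp [pvSCount]
  | cons doc rest ih =>
    simp only [List.foldl_cons]
    rw [show pvStepA (d, s) doc = ((pvStepA (d, s) doc).1, (pvStepA (d, s) doc).2) from rfl]
    rw [ih]
    simp only [pvStepA, pvSCount, List.countP_cons]
    split <;> · push_cast; ring

-- ===== VERDICT (by name: the statement is the Claim_ definition above) =====
theorem analyze_logs_spec : Claim_equal_analyze_logs := by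
  intro logs _
  unfold Spec_analyze_logs analyze_logs analyze_logs_alt
  rw [pvConquer_eq]
  simp only
  refine congrArg₂ Prod.mk ?_ ?_
  · have hkeys := pvLoop_keys logs
      (PySem.Dict.mk [("GET", 0), ("POST", 0), ("PUT", 0), ("PATCH", 0), ("DELETE", 0)]) 0
    have hnd : (logs.foldl pvStepA
        (PySem.Dict.mk [("GET", 0), ("POST", 0), ("PUT", 0), ("PATCH", 0), ("DELETE", 0)], 0)).1.keys.Nodup := by
      rw [hkeys]; decide
    rw [PySem.Dict.items_eq_map_keys _ hnd 0, hkeys]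
    simp only [PySem.Dict.keys_mk, List.map_cons, List.map_nil, pvKeys]
    refine congrArg₂ _ ?_ (congrArg₂ _ ?_ (congrArg₂ _ ?_ (congrArg₂ _ ?_ (congrArg₂ _ ?_ rfl)))) <;>
      · refine congrArg _ ?_
        rw [pvLoop_getD logs _ 0 _ (by decide)]
        simp
        decide
  · simpa using pvLoop_snd logs _ 0
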